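-- pv_equiv track=rewrite | github.com/IPI-Paul/Python | Django/justin_mitchel/drf/backend/index/views.py | get_functions
-- ===== SOURCE A (Python) =====
-- def get_functions(views, view):
--   functions = '<div class=function>'
--   for obj in views:
--     if isinstance(obj, dict):
--       if obj['class'] == view:
--         if functions != '<div class=function>':
--           functions += ', '
--         functions += f'<span>{obj["function"]}</span>'
--   functions += '</div>'
--   return functions
-- ===== SOURCE B (Python) =====
-- def get_functions(views, view):
--     # Two-state recursive emitter: `first` scans until the first matching dict,
--     # then hands over to `more`, which prefixes ', ' to every further fragment.
--     # The string is assembled back-to-front by the recursion, with no accumulator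
--     # and no sentinel comparison.
--     def frag(obj):
--         return f'<span>{obj["function"]}</span>'
--
--     def first(rest):
--         if not rest:
--             return ''
--         obj, rest = rest[0], rest[1:]
--         if isinstance(obj, dict) and obj['class'] == view:
--             return frag(obj) + more(rest)
--         return first(rest)
--
--     def more(rest):
--         if not rest:
--             return ''
--         obj, rest = rest[0], rest[1:]
--         if isinstance(obj, dict) and obj['class'] == view:
--             return ', ' + frag(obj) + more(rest)
--         return more(rest)
--
--     return '<div class=function>' + first(views) + '</div>'
-- ===== Notes on version B (the rewrite author's own statement) =====
-- stated objective: alternative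
-- what changed: Replaces A's accumulator loop with its sentinel string comparison deciding separators by a pair of mutually recursive emitters (a 'first' state up to the first match, then a 'more' state that prefixes ', '), building the result back-to-front with no accumulator.
import Mathlib
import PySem

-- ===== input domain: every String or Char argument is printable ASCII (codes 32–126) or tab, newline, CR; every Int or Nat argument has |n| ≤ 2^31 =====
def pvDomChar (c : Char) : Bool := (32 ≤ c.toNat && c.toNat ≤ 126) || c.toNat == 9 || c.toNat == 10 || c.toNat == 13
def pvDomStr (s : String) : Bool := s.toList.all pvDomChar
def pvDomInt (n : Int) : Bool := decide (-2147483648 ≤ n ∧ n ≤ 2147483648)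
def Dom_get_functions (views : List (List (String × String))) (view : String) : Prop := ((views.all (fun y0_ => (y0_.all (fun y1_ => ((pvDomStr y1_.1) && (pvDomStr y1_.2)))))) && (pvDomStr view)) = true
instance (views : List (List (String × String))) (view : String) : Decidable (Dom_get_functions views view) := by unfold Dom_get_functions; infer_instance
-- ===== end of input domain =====

-- B replaces A's accumulator loop (with its sentinel comparison choosing separators)
-- by two mutually recursive emitters building the string back-to-front (objective: alternative; same cost).


-- ===== PORT A =====
-- Each obj is a dict (so 'isinstance(obj, dict)' is always true under the type convention);
-- obj['class'] / obj['function'] are KeyError where missing — Pre_ excludes exactly those inputs,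
-- so the 'getD _ ""' default is never reached on admitted inputs.
def get_functions (views : List (List (String × String))) (view : String) : String :=
  let functions : String := "<div class=function>"
  let functions := views.foldl (fun functions obj =>
    if PySem.Dict.getD (PySem.Dict.mk obj) "class" "" == view then
      let functions := if functions != "<div class=function>" then functions ++ ", " else functions
      functions ++ "<span>" ++ PySem.Dict.getD (PySem.Dict.mk obj) "function" "" ++ "</span>"
    else functions) functions
  functions ++ "</div>"

-- ===== PORT B =====
def fragB (obj : List (String × String)) : String :=
  "<span>" ++ PySem.Dict.getD (PySem.Dict.mk obj) "function" "" ++ "</span>"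

mutual
  -- 'first': scanning before any match has been emitted
  def firstB (view : String) : List (List (String × String)) → String
    | [] => ""
    | obj :: rest =>
      if PySem.Dict.getD (PySem.Dict.mk obj) "class" "" == view then
        fragB obj ++ moreB view rest
      else firstB view rest
  -- 'more': every further match is prefixed with ', '
  def moreB (view : String) : List (List (String × String)) → String
    | [] => ""
    | obj :: rest =>
      if PySem.Dict.getD (PySem.Dict.mk obj) "class" "" == view then
        ", " ++ fragB obj ++ moreB view rest
      else moreB view rest
end

def get_functions_alt (views : List (List (String × String))) (view : String) : String :=
  "<div class=function>" ++ firstB view views ++ "</div>"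

-- ===== PRECONDITION & SPEC =====
-- Pre_ excludes exactly the inputs where Python A raises KeyError: a dict missing 'class',
-- or a dict whose 'class' equals view but which misses 'function' (B raises there too).
def Pre_get_functions (views : List (List (String × String))) (view : String) : Prop :=
  ∀ obj ∈ views, (PySem.Dict.mk obj).contains "class" = true ∧
    (PySem.Dict.getD (PySem.Dict.mk obj) "class" "" = view →
      (PySem.Dict.mk obj).contains "function" = true)
instance (views : List (List (String × String))) (view : String) : Decidable (Pre_get_functions views view) := by unfold Pre_get_functions; infer_instance
def pvWitness_get_functions : (List (List (String × String))) × String :=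
  ([[("class", "Home"), ("function", "index")], [("class", "About"), ("function", "about")], [("class", "Home"), ("function", "detail")]], "Home")
def Spec_get_functions (views : List (List (String × String))) (view : String) (out : String) : Prop := out = get_functions_alt views view
instance (views : List (List (String × String))) (view : String) (out : String) : Decidable (Spec_get_functions views view out) := by unfold Spec_get_functions; infer_instance

-- ===== CLAIM (what is proved, stated in full; the proofs are below) =====
def Claim_equal_get_functions : Prop := ∀ (views : List (List (String × String))) (view : String), Dom_get_functions views view → Pre_get_functions views view → Spec_get_functions views view (get_functions views view)

-- ===== LEMMAS AND PROOFS =====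

-- once the accumulator is strictly longer than the header, A's remaining loop emits moreB
theorem pv_loop_more (view : String) (vs : List (List (String × String))) :
    ∀ (s : String), "<div class=function>".length < s.length →
    vs.foldl (fun functions obj =>
      if PySem.Dict.getD (PySem.Dict.mk obj) "class" "" == view then
        let functions := if functions != "<div class=function>" then functions ++ ", " else functions
        functions ++ "<span>" ++ PySem.Dict.getD (PySem.Dict.mk obj) "function" "" ++ "</span>"
      else functions) s
    = s ++ moreB view vs := by
  induction vs with
  | nil => intro s _; simp [moreB]
  | cons v vs ih =>
    intro s hlen
    have hne : s ≠ "<div class=function>" := by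
      intro h; subst h; exact lt_irrefl _ hlen
    have hbne : (s != "<div class=function>") = true := by simp [bne_iff_ne, hne]
    by_cases hP : PySem.Dict.getD (PySem.Dict.mk v) "class" "" == view
    · simp only [List.foldl_cons, hP, if_pos, hbne]
      rw [ih _ (by
        have h1 : "<div class=function>".length = 20 := by decide
        have h2 : ", ".length = 2 := by decide
        simp [String.length_append, h1, h2]; omega)]
      simp [moreB, hP, fragB, String.append_assoc]
      rw [← String.append_assoc]; rfl
    · simp only [List.foldl_cons, hP, if_neg, Bool.not_eq_true]
      rw [ih s hlen]
      simp [moreB, hP]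

-- from the header, A's loop emits firstB
theorem pv_loop_first (view : String) (vs : List (List (String × String))) :
    vs.foldl (fun functions obj =>
      if PySem.Dict.getD (PySem.Dict.mk obj) "class" "" == view then
        let functions := if functions != "<div class=function>" then functions ++ ", " else functions
        functions ++ "<span>" ++ PySem.Dict.getD (PySem.Dict.mk obj) "function" "" ++ "</span>"
      else functions) "<div class=function>"
    = "<div class=function>" ++ firstB view vs := by
  induction vs with
  | nil => simp [firstB]
  | cons v vs ih =>
    by_cases hP : PySem.Dict.getD (PySem.Dict.mk v) "class" "" == view
    · simp only [List.foldl_cons, hP, if_pos, bne_self_eq_false, Bool.false_eq_true, if_false]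
      rw [pv_loop_more view vs _ (by
        have h1 : "<div class=function>".length = 20 := by decide
        have h2 : "<div class=function><span>".length = 26 := by decide
        have h3 : "</span>".length = 7 := by decide
        simp [String.length_append, h1, h2, h3]; omega)]
      simp [firstB, hP, fragB, String.append_assoc]
      rw [← String.append_assoc]; rfl
    · simp only [List.foldl_cons, hP, if_neg, Bool.not_eq_true]
      rw [ih]
      simp [firstB, hP]

-- ===== VERDICT (by name: the statement is the Claim_ definition above) =====
theorem get_functions_spec : Claim_equal_get_functions := by
  intro views view _ _
  unfold Spec_get_functions get_functions get_functions_alt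
  simp only [pv_loop_first view views]
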